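-- pv_equiv track=rewrite | github.com/ZMakesThingsN/z2danimation | z2d_op_fblend.py | x_voronoi_classitris
-- ===== SOURCE A (Python) =====
-- def x_voronoi_classitris( feats, strokefeats, edges, triss, vverts, vfeatureedges ):
--
-- 	featedges = {};
-- 	for strokeidx in range( len( strokefeats ) ):
-- 		stroke = strokefeats[strokeidx]
-- 		iprev = None;
-- 		ipoint = 0;
-- 		for featidx in range( len( stroke ) ):
-- 			feati = stroke[ featidx ];
-- 			if iprev != None:
-- 				featedges[ ( min( feati, iprev ), max( feati, iprev ) ) ] = ( strokeidx, featidx )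
-- 			iprev = feati;
--
-- 	R = {}
-- 	for trisidx in triss:
-- 		trisclass = 0;
-- 		for edge in triss[ trisidx ]:
-- 			edgekey = ( min(  edge[0],  edge[1] ), max(  edge[0],  edge[1] ) )
-- 			if edgekey in featedges:
-- 				trisclass += 1;
-- 		R[trisidx] = trisclass;
-- 	return R;
-- ===== SOURCE B (Python) =====
-- def x_voronoi_classitris( feats, strokefeats, edges, triss, vverts, vfeatureedges ):
-- 	# Feature-driven counting: collect the set of normalized feature-edge keys,
-- 	# build an index from each normalized triangle-edge key to the triangle keys
-- 	# holding it (once per occurrence), then let the feature keys drive the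
-- 	# increments into a zero-initialized result dict.
-- 	featkeys = set()
-- 	for stroke in strokefeats:
-- 		for a, b in zip(stroke, stroke[1:]):
-- 			featkeys.add((min(a, b), max(a, b)))
-- 	R = {}
-- 	for trisidx in triss:
-- 		R[trisidx] = 0
-- 	index = {}
-- 	for trisidx in triss:
-- 		for edge in triss[trisidx]:
-- 			key = (min(edge[0], edge[1]), max(edge[0], edge[1]))
-- 			index.setdefault(key, []).append(trisidx)
-- 	for key in featkeys:
-- 		for trisidx in index.get(key, []):
-- 			R[trisidx] += 1
-- 	return R
-- ===== Notes on version B (the rewrite author's own statement) =====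
-- stated objective: alternative
-- what changed: B flips the driving loop: it pre-initializes every triangle's count to 0, builds an index from each normalized triangle-edge key to the triangle keys holding it (once per occurrence), and then iterates over the set of feature-edge keys, incrementing the count of every triangle listed under that key, instead of scanning each triangle's edges against a feature-edge dict.
import Mathlib
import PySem

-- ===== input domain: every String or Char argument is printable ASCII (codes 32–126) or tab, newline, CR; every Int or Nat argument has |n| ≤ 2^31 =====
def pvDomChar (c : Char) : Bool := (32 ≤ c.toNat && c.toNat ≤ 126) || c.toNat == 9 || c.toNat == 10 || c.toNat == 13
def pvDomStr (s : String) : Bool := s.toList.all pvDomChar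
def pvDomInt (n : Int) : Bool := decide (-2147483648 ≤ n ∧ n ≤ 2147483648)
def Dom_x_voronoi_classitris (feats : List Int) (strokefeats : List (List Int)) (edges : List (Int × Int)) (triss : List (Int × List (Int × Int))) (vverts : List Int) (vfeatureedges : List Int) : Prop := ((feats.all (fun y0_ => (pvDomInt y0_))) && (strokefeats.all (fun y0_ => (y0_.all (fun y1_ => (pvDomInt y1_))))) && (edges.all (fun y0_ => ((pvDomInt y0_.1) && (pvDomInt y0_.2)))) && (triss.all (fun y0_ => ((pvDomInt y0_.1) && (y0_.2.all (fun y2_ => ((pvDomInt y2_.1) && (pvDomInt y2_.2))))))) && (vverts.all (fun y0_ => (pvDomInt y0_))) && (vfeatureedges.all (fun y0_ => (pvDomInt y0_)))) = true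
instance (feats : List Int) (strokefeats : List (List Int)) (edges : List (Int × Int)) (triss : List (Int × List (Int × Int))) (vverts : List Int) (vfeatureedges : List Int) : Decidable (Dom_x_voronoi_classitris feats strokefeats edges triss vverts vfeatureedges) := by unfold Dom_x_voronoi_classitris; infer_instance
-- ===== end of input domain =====

-- B flips the driving loop: instead of scanning each triangle's edges against the
-- feature-edge dict, it pre-initializes every triangle count to 0, builds an index
-- from each normalized triangle-edge key to the triangle keys holding it (once per
-- occurrence), and lets the feature keys drive the increments (objective: alternative).

-- ===== PORT A =====
-- inner loop body of A's featedges construction (iprev threaded as Option)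
def aFeatStep (si : Int) (st : Option Int × PySem.Dict (Int × Int) (Int × Int)) (fp : Int × Int) :
    Option Int × PySem.Dict (Int × Int) (Int × Int) :=
  match st.1 with
  | none => (some fp.2, st.2)
  | some ip => (some fp.2, st.2.insert (min fp.2 ip, max fp.2 ip) (si, fp.1))

def aFeatDict (strokefeats : List (List Int)) : PySem.Dict (Int × Int) (Int × Int) :=
  (PySem.List.enumerate strokefeats).foldl
    (fun d sp => ((PySem.List.enumerate sp.2).foldl (aFeatStep sp.1) (none, d)).2)
    PySem.Dict.empty

-- A's per-triangle edge scan ('trisclass' accumulator)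
def aCount (featedges : PySem.Dict (Int × Int) (Int × Int)) (tedges : List (Int × Int)) : Int :=
  tedges.foldl
    (fun c edge => if featedges.contains (min edge.1 edge.2, max edge.1 edge.2) then c + 1 else c) 0

def x_voronoi_classitris (feats : List Int) (strokefeats : List (List Int)) (edges : List (Int × Int)) (triss : List (Int × List (Int × Int))) (vverts : List Int) (vfeatureedges : List Int) : List (Int × Int) :=
  let featedges := aFeatDict strokefeats
  let R := (triss.map Prod.fst).foldl
    (fun R trisidx => R.insert trisidx (aCount featedges ((PySem.Dict.mk triss).getD trisidx [])))
    PySem.Dict.empty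
  R.items

-- ===== PORT B =====
-- set of normalized feature-edge keys (stroke[1:] ported as drop 1, exact for [1:])
def bFeatSet (strokefeats : List (List Int)) : PySem.Set (Int × Int) :=
  strokefeats.foldl
    (fun s stroke =>
      (stroke.zip (stroke.drop 1)).foldl
        (fun s ab => PySem.Set.add s (min ab.1 ab.2, max ab.1 ab.2)) s)
    PySem.Set.empty

-- zero-initialized result dict, one entry per triangle key
def bInit (triss : List (Int × List (Int × Int))) : PySem.Dict Int Int :=
  triss.foldl (fun d p => d.insert p.1 0) PySem.Dict.empty

-- normalized edge key -> triangle keys holding it, once per occurrence (setdefault+append)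
def bIndex (triss : List (Int × List (Int × Int))) : PySem.Dict (Int × Int) (List Int) :=
  triss.foldl
    (fun d p =>
      p.2.foldl (fun d e => d.modify (min e.1 e.2, max e.1 e.2) [] (fun l => l ++ [p.1])) d)
    PySem.Dict.empty

def x_voronoi_classitris_alt (feats : List Int) (strokefeats : List (List Int)) (edges : List (Int × Int)) (triss : List (Int × List (Int × Int))) (vverts : List Int) (vfeatureedges : List Int) : List (Int × Int) :=
  let featkeys := bFeatSet strokefeats
  let index := bIndex triss
  let Rf := featkeys.foldl
    (fun R key => (index.getD key []).foldl (fun R trisidx => R.modify trisidx 0 (fun c => c + 1)) R)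
    (bInit triss)
  Rf.items

-- ===== PRECONDITION & SPEC =====
-- triss is a Python dict: an association list with duplicate keys represents no dict
-- input the Python function can receive, so those lists are outside Pre_.
def Pre_x_voronoi_classitris (feats : List Int) (strokefeats : List (List Int)) (edges : List (Int × Int)) (triss : List (Int × List (Int × Int))) (vverts : List Int) (vfeatureedges : List Int) : Prop :=
  (triss.map Prod.fst).Nodup
instance (feats : List Int) (strokefeats : List (List Int)) (edges : List (Int × Int)) (triss : List (Int × List (Int × Int))) (vverts : List Int) (vfeatureedges : List Int) : Decidable (Pre_x_voronoi_classitris feats strokefeats edges triss vverts vfeatureedges) := by unfold Pre_x_voronoi_classitris; infer_instance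

def pvWitness_x_voronoi_classitris : List Int × List (List Int) × (List (Int × Int)) × (List (Int × List (Int × Int))) × List Int × List Int :=
  ([], [[0, 1, 2]], [], [(0, [(0, 1), (2, 3)]), (1, [(1, 2)])], [], [])

def Spec_x_voronoi_classitris (feats : List Int) (strokefeats : List (List Int)) (edges : List (Int × Int)) (triss : List (Int × List (Int × Int))) (vverts : List Int) (vfeatureedges : List Int) (out : List (Int × Int)) : Prop := out = x_voronoi_classitris_alt feats strokefeats edges triss vverts vfeatureedges
instance (feats : List Int) (strokefeats : List (List Int)) (edges : List (Int × Int)) (triss : List (Int × List (Int × Int))) (vverts : List Int) (vfeatureedges : List Int) (out : List (Int × Int)) : Decidable (Spec_x_voronoi_classitris feats strokefeats edges triss vverts vfeatureedges out) := by unfold Spec_x_voronoi_classitris; infer_instance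

-- ===== CLAIM (what is proved, stated in full; the proofs are below) =====
def Claim_equal_x_voronoi_classitris : Prop := ∀ (feats : List Int) (strokefeats : List (List Int)) (edges : List (Int × Int)) (triss : List (Int × List (Int × Int))) (vverts : List Int) (vfeatureedges : List Int), Dom_x_voronoi_classitris feats strokefeats edges triss vverts vfeatureedges → Pre_x_voronoi_classitris feats strokefeats edges triss vverts vfeatureedges → Spec_x_voronoi_classitris feats strokefeats edges triss vverts vfeatureedges (x_voronoi_classitris feats strokefeats edges triss vverts vfeatureedges)

-- ===== LEMMAS AND PROOFS =====

-- the normalized keys of the consecutive pairs of a stroke, with the pending previous point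
def pairKeys : Option Int → List Int → List (Int × Int)
  | _, [] => []
  | none, x :: xs => pairKeys (some x) xs
  | some p, x :: xs => (min x p, max x p) :: pairKeys (some x) xs

-- all feature-edge keys, in stroke order
def allKeys (strokefeats : List (List Int)) : List (Int × Int) :=
  strokefeats.flatMap (pairKeys none)

theorem pairKeys_some_eq_zip (l : List Int) : ∀ p : Int,
    pairKeys (some p) l = ((p :: l).zip l).map (fun ab => (min ab.1 ab.2, max ab.1 ab.2)) := by
  induction l with
  | nil => intro p; simp [pairKeys]
  | cons x xs ih => intro p; simp [pairKeys, ih x, min_comm, max_comm]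

theorem pairKeys_none_eq_zip (l : List Int) :
    pairKeys none l = (l.zip (l.drop 1)).map (fun ab => (min ab.1 ab.2, max ab.1 ab.2)) := by
  cases l with
  | nil => simp [pairKeys]
  | cons x xs => simpa [pairKeys] using pairKeys_some_eq_zip xs x

theorem enumerate_map_snd {α : Type} (xs : List α) (k : Int) :
    (PySem.List.enumerate xs k).map Prod.snd = xs := by
  induction xs generalizing k <;> simp [PySem.List.enumerate, *]

theorem innerA_contains (si : Int) (L : List (Int × Int)) :
    ∀ (ip : Option Int) (d : PySem.Dict (Int × Int) (Int × Int)) (c : Int × Int),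
    ((L.foldl (aFeatStep si) (ip, d)).2).contains c
      = (d.contains c || decide (c ∈ pairKeys ip (L.map Prod.snd))) := by
  induction L with
  | nil => intro ip d c; simp [pairKeys]
  | cons a L ih =>
    intro ip d c
    cases ip with
    | none =>
      simp only [List.foldl_cons, aFeatStep, List.map_cons, pairKeys]
      exact ih (some a.2) d c
    | some p =>
      simp only [List.foldl_cons, aFeatStep, ih, List.map_cons, pairKeys,
        PySem.Dict.contains_insert, List.mem_cons]
      by_cases h : c = (min a.2 p, max a.2 p) <;>
        simp [h, Bool.or_assoc, Bool.or_comm, Bool.or_left_comm]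

theorem aFeatDict_contains (strokefeats : List (List Int)) (c : Int × Int) :
    (aFeatDict strokefeats).contains c = decide (c ∈ allKeys strokefeats) := by
  unfold aFeatDict
  suffices h : ∀ (LS : List (Int × List Int)) (d : PySem.Dict (Int × Int) (Int × Int)),
      (LS.foldl (fun d sp => ((PySem.List.enumerate sp.2).foldl (aFeatStep sp.1) (none, d)).2) d).contains c
        = (d.contains c || decide (c ∈ (LS.map Prod.snd).flatMap (pairKeys none))) by
    rw [h]
    simp [allKeys]
  intro LS
  induction LS with
  | nil => intro d; simp
  | cons sp LS ih =>
    intro d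
    rw [List.foldl_cons, ih, innerA_contains, enumerate_map_snd]
    by_cases h1 : c ∈ pairKeys none sp.2 <;>
      by_cases h2 : c ∈ List.flatMap (pairKeys none) (List.map Prod.snd LS) <;>
        simp [h1, h2, List.flatMap_cons]

theorem bFeatSet_mem (strokefeats : List (List Int)) (c : Int × Int) :
    c ∈ bFeatSet strokefeats ↔ c ∈ allKeys strokefeats := by
  unfold bFeatSet
  suffices h : ∀ (LS : List (List Int)) (s : PySem.Set (Int × Int)),
      c ∈ LS.foldl (fun s stroke => (stroke.zip (stroke.drop 1)).foldl
            (fun s ab => PySem.Set.add s (min ab.1 ab.2, max ab.1 ab.2)) s) s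
        ↔ c ∈ s ∨ c ∈ LS.flatMap (pairKeys none) by
    rw [h]; simp [allKeys]
  intro LS
  induction LS with
  | nil => intro s; simp
  | cons stroke LS ih =>
    intro s
    rw [List.foldl_cons, ih]
    have hupd : (stroke.zip (stroke.drop 1)).foldl
        (fun s ab => PySem.Set.add s (min ab.1 ab.2, max ab.1 ab.2)) s
        = PySem.Set.update s (pairKeys none stroke) := by
      rw [pairKeys_none_eq_zip]
      simp [PySem.Set.update, List.foldl_map]
    rw [hupd, PySem.Set.mem_update]
    simp [or_assoc]

theorem bFeatSet_nodup (strokefeats : List (List Int)) : (bFeatSet strokefeats).Nodup := by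
  unfold bFeatSet
  suffices h : ∀ (LS : List (List Int)) (s : PySem.Set (Int × Int)), s.Nodup →
      (LS.foldl (fun s stroke => (stroke.zip (stroke.drop 1)).foldl
        (fun s ab => PySem.Set.add s (min ab.1 ab.2, max ab.1 ab.2)) s) s).Nodup by
    exact h _ _ List.nodup_nil
  intro LS
  induction LS with
  | nil => intro s hs; simpa using hs
  | cons stroke LS ih =>
    intro s hs
    rw [List.foldl_cons]
    apply ih
    have hupd : (stroke.zip (stroke.drop 1)).foldl
        (fun s ab => PySem.Set.add s (min ab.1 ab.2, max ab.1 ab.2)) s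
        = PySem.Set.update s ((stroke.zip (stroke.drop 1)).map (fun ab => (min ab.1 ab.2, max ab.1 ab.2))) := by
      simp [PySem.Set.update, List.foldl_map]
    rw [hupd]
    exact PySem.Set.nodup_update _ _ hs

-- occurrences of normalized triangle-edge keys, paired with their triangle key
def occs (triss : List (Int × List (Int × Int))) : List ((Int × Int) × Int) :=
  triss.flatMap (fun p => p.2.map (fun e => ((min e.1 e.2, max e.1 e.2), p.1)))

theorem bIndex_getD (triss : List (Int × List (Int × Int))) (c : Int × Int) :
    (bIndex triss).getD c []
      = ((occs triss).filter (fun o => o.1 == c)).map (fun o => o.2) := by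
  have h : bIndex triss
      = (occs triss).foldl (fun d o => d.modify o.1 [] (fun l => l ++ [o.2])) PySem.Dict.empty := by
    unfold bIndex occs
    rw [List.foldl_flatMap]
    apply PySem.List.foldl_congr_mem
    intro acc x _
    rw [List.foldl_map]
  rw [h, PySem.Dict.getD_foldl_modify_append]
  simp

-- a sum over distinct keys of per-key filtered counts collapses to a membership count
theorem sum_countP_mem {α β : Type} [BEq β] [LawfulBEq β] (S : List β) (hS : S.Nodup)
    (l : List α) (key : α → β) (q : α → Bool) :
    (S.map (fun c => l.countP (fun x => q x && (key x == c)))).sum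
      = l.countP (fun x => q x && decide (key x ∈ S)) := by
  induction l with
  | nil => simp
  | cons x l ih =>
    simp only [List.countP_cons]
    rw [← ih, List.sum_map_add]
    congr 1
    have hcnt : List.countP (BEq.beq (key x)) S = List.count (key x) S := by
      rw [List.count_eq_countP]
      apply List.countP_congr
      intro a _
      constructor <;> (intro h; simp_all)
    by_cases hq : q x = true
    · simp only [hq, Bool.true_and]
      rw [PySem.List.sum_map_ite_one_zero_nat (BEq.beq (key x)) S, hcnt]
      by_cases hm : key x ∈ S
      · simp [hm, List.count_eq_one_of_mem hS hm]
      · simp [hm, List.count_eq_zero_of_not_mem hm]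
    · simp [Bool.not_eq_true] at hq
      simp [hq]

-- a sum over a fst-nodup pair list collapses to the single matching element
theorem sum_map_single {τ : Type} (l : List (Int × τ)) (f : Int × τ → Nat)
    (hnd : (l.map Prod.fst).Nodup) (p : Int × τ) (hp : p ∈ l)
    (h0 : ∀ p' ∈ l, p'.1 ≠ p.1 → f p' = 0) :
    (l.map f).sum = f p := by
  induction l with
  | nil => simp at hp
  | cons a l ih =>
    simp only [List.map_cons, List.nodup_cons] at hnd
    rcases List.mem_cons.mp hp with rfl | hpl
    · simp only [List.map_cons, List.sum_cons]
      have : ∀ x ∈ l.map f, x = 0 := by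
        intro x hx
        rcases List.mem_map.mp hx with ⟨p', hp', rfl⟩
        exact h0 p' (List.mem_cons_of_mem _ hp')
          (fun he => hnd.1 (he ▸ List.mem_map_of_mem hp'))
      rw [List.sum_eq_zero this]
      simp
    · have ha : f a = 0 := h0 a (List.mem_cons_self) (by
        intro he
        exact hnd.1 (he ▸ List.mem_map_of_mem hpl))
      simp only [List.map_cons, List.sum_cons, ha, Nat.zero_add]
      exact ih hnd.2 hpl (fun p' h' => h0 p' (List.mem_cons_of_mem _ h'))

theorem bInit_items (triss : List (Int × List (Int × Int)))
    (hnd : (triss.map Prod.fst).Nodup) :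
    (bInit triss).items = triss.map (fun p => (p.1, (0 : Int))) := by
  unfold bInit
  have := PySem.Dict.items_foldl_insert_fresh triss Prod.fst (fun _ => (0 : Int))
    PySem.Dict.empty (by intro a _; simp) hnd
  simpa using this

-- count of a triangle key in the flattened increment stream
theorem incs_count (triss : List (Int × List (Int × Int))) (S : PySem.Set (Int × Int))
    (hS : S.Nodup) (p : Int × List (Int × Int)) (hp : p ∈ triss)
    (hnd : (triss.map Prod.fst).Nodup) :
    (S.flatMap (fun c => (bIndex triss).getD c [])).count p.1
      = p.2.countP (fun e => decide ((min e.1 e.2, max e.1 e.2) ∈ S)) := by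
  rw [List.count_eq_countP, List.countP_flatMap]
  have h1 : ∀ c : Int × Int, ((bIndex triss).getD c []).countP (fun x => x == p.1)
      = (occs triss).countP (fun o => (o.2 == p.1) && (o.1 == c)) := by
    intro c
    rw [bIndex_getD, List.countP_map, ← List.countP_filter]
    rfl
  have h2 : (S.map (List.countP (fun x => x == p.1) ∘ fun c => (bIndex triss).getD c [])).sum
      = (S.map (fun c => (occs triss).countP (fun o => (o.2 == p.1) && (o.1 == c)))).sum := by
    congr 1
    exact List.map_congr_left (fun c _ => h1 c)
  rw [h2]
  have h4 := sum_countP_mem S hS (occs triss) (fun o => o.1) (fun o => o.2 == p.1)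
  refine h4.trans ?_
  unfold occs
  rw [List.countP_flatMap]
  have h3 : ∀ p' : Int × List (Int × Int),
      (List.countP (fun o => (o.2 == p.1) && decide (o.1 ∈ S)) ∘
        fun p' => p'.2.map (fun e => ((min e.1 e.2, max e.1 e.2), p'.1))) p'
      = if p'.1 = p.1 then p'.2.countP (fun e => decide ((min e.1 e.2, max e.1 e.2) ∈ S)) else 0 := by
    intro p'
    simp only [Function.comp_apply, List.countP_map]
    by_cases he : p'.1 = p.1
    · simp only [he]
      apply List.countP_congr
      intro e _
      simp
    · rw [if_neg he]
      apply List.countP_eq_zero.mpr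
      intro e _
      simp [he]
  have h5 := congrArg List.sum (List.map_congr_left (fun p' (_ : p' ∈ triss) => h3 p'))
  refine h5.trans ?_
  have h6 := sum_map_single triss
    (fun p' => if p'.1 = p.1 then p'.2.countP (fun e => decide ((min e.1 e.2, max e.1 e.2) ∈ S)) else 0)
    hnd p hp (fun p' _ h' => by simp [h'])
  refine h6.trans ?_
  simp

theorem set_update_eq_self {α : Type} [BEq α] [LawfulBEq α] (l : List α) :
    ∀ (s : PySem.Set α), (∀ x ∈ l, x ∈ s) → PySem.Set.update s l = s := by
  induction l with
  | nil => intro s _; rfl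
  | cons x l ih =>
    intro s hs
    have : PySem.Set.update s (x :: l) = PySem.Set.update (s.add x) l := rfl
    rw [this, PySem.Set.add_of_mem (hs x (List.mem_cons_self))]
    exact ih s (fun y hy => hs y (List.mem_cons_of_mem _ hy))

theorem incs_subset (triss : List (Int × List (Int × Int))) (S : PySem.Set (Int × Int))
    (k : Int) (hk : k ∈ S.flatMap (fun c => (bIndex triss).getD c [])) :
    k ∈ triss.map Prod.fst := by
  rcases List.mem_flatMap.mp hk with ⟨c, _, hkc⟩
  rw [bIndex_getD] at hkc
  rcases List.mem_map.mp hkc with ⟨o, ho, rfl⟩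
  rcases List.mem_flatMap.mp (List.mem_of_mem_filter ho) with ⟨p', hp', hop⟩
  rcases List.mem_map.mp hop with ⟨e, _, rfl⟩
  exact List.mem_map_of_mem hp'

-- B's result, characterized
theorem alt_items (feats : List Int) (strokefeats : List (List Int)) (edges : List (Int × Int))
    (triss : List (Int × List (Int × Int))) (vverts : List Int) (vfeatureedges : List Int)
    (hnd : (triss.map Prod.fst).Nodup) :
    x_voronoi_classitris_alt feats strokefeats edges triss vverts vfeatureedges
      = triss.map (fun p => (p.1,
          ((p.2.countP (fun e => decide ((min e.1 e.2, max e.1 e.2) ∈ bFeatSet strokefeats)) : Nat) : Int))) := by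
  unfold x_voronoi_classitris_alt
  simp only []
  set S := bFeatSet strokefeats with hSdef
  set inc := S.flatMap (fun c => (bIndex triss).getD c []) with hincdef
  have hflat : S.foldl
      (fun R key => ((bIndex triss).getD key []).foldl (fun R trisidx => R.modify trisidx 0 (fun c => c + 1)) R)
      (bInit triss)
      = inc.foldl (fun R trisidx => R.modify trisidx 0 (fun c => c + 1)) (bInit triss) := by
    rw [hincdef, List.foldl_flatMap]
  rw [hflat]
  have hkeys0 : (bInit triss).keys = triss.map Prod.fst := by
    show (bInit triss).items.map Prod.fst = _
    rw [bInit_items triss hnd]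
    simp
  have hkeys : (inc.foldl (fun R trisidx => R.modify trisidx 0 (fun c => c + 1)) (bInit triss)).keys
      = triss.map Prod.fst := by
    rw [PySem.Dict.keys_foldl_modify inc 0 (fun _ _ => (· + 1)) (bInit triss), hkeys0]
    exact set_update_eq_self inc _ (fun x hx => incs_subset triss S x hx)
  have hkeysnd : (inc.foldl (fun R trisidx => R.modify trisidx 0 (fun c => c + 1)) (bInit triss)).keys.Nodup := by
    rw [hkeys]; exact hnd
  rw [PySem.Dict.items_eq_map_keys _ hkeysnd 0, hkeys]
  rw [← List.comp_map]
  apply List.map_congr_left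
  intro p hp
  simp only [Function.comp_apply]
  have hgd : (inc.foldl (fun R trisidx => R.modify trisidx 0 (fun c => c + 1)) (bInit triss)).getD p.1 0
      = (bInit triss).getD p.1 0 + (inc.count p.1 : Int) :=
    PySem.Dict.getD_foldl_modify_add_one inc (bInit triss) p.1
  have h0 : (bInit triss).getD p.1 0 = 0 := by
    apply PySem.Dict.getD_of_mem_items (bInit triss) (k := p.1) (v := (0 : Int))
    · rw [bInit_items triss hnd]
      exact List.mem_map_of_mem hp
    · rw [show (bInit triss).keys = (bInit triss).items.map Prod.fst from rfl, bInit_items triss hnd]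
      simpa using hnd
  rw [hgd, h0, zero_add, incs_count triss S (bFeatSet_nodup strokefeats) p hp hnd]

-- A's result, characterized
theorem a_items (feats : List Int) (strokefeats : List (List Int)) (edges : List (Int × Int))
    (triss : List (Int × List (Int × Int))) (vverts : List Int) (vfeatureedges : List Int)
    (hnd : (triss.map Prod.fst).Nodup) :
    x_voronoi_classitris feats strokefeats edges triss vverts vfeatureedges
      = triss.map (fun p => (p.1,
          ((p.2.countP (fun e => (aFeatDict strokefeats).contains (min e.1 e.2, max e.1 e.2)) : Nat) : Int))) := by
  unfold x_voronoi_classitris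
  simp only []
  have hitems := PySem.Dict.items_foldl_insert_fresh (triss.map Prod.fst) id
    (fun trisidx => aCount (aFeatDict strokefeats) ((PySem.Dict.mk triss).getD trisidx []))
    PySem.Dict.empty (by intro a _; simp) (by simpa using hnd)
  simp only [id] at hitems
  rw [hitems]
  simp only [PySem.Dict.empty, List.nil_append, List.map_map]
  apply List.map_congr_left
  intro p hp
  simp only [Function.comp_apply]
  have hgd : (PySem.Dict.mk triss).getD p.1 [] = p.2 := by
    apply PySem.Dict.getD_of_mem_items (PySem.Dict.mk triss) (k := p.1) (v := p.2)
    · exact hp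
    · simpa using hnd
  rw [hgd]
  congr 1
  unfold aCount
  rw [PySem.List.foldl_if_add_one
    (fun edge => (aFeatDict strokefeats).contains (min edge.1 edge.2, max edge.1 edge.2)) p.2 0]
  rw [zero_add]

-- ===== VERDICT (by name: the statement is the Claim_ definition above) =====
theorem x_voronoi_classitris_spec : Claim_equal_x_voronoi_classitris := by
  intro feats strokefeats edges triss vverts vfeatureedges _ hpre
  unfold Spec_x_voronoi_classitris
  rw [a_items feats strokefeats edges triss vverts vfeatureedges hpre,
      alt_items feats strokefeats edges triss vverts vfeatureedges hpre]
  apply List.map_congr_left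
  intro p _
  congr 1
  congr 1
  apply List.countP_congr
  intro e _
  rw [aFeatDict_contains]
  simp [bFeatSet_mem]
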